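-- pv_equiv track=rewrite | github.com/harmonixfi/hip3-agent | scripts/hl_reset_backfill.py | _merge_targets
-- ===== SOURCE A (Python) =====
-- from typing import Any, Dict, List, Optional, Set, Tuple
--
-- def _merge_targets(
--     base: Dict[str, Dict[str, Dict[str, Dict[str, str]]]],
--     extra: Dict[str, Dict[str, Dict[str, Dict[str, str]]]],
-- ) -> Dict[str, Dict[str, Dict[str, Dict[str, str]]]]:
--     out: Dict[str, Dict[str, Dict[str, Dict[str, str]]]] = {}
--     for acct, d1 in base.items():
--         out[acct] = {}
--         for dex, d2 in d1.items():
--             out[acct][dex] = dict(d2)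
--     for acct, d1 in extra.items():
--         for dex, d2 in d1.items():
--             for coin, meta in d2.items():
--                 out.setdefault(acct, {}).setdefault(dex, {})
--                 if coin not in out[acct][dex]:
--                     out[acct][dex][coin] = meta
--     return out
-- ===== SOURCE B (Python) =====
-- def _merge_targets(
--     base,
--     extra,
-- ):
--     # Recursive depth-limited deep-merge: base wins on conflicts; extra-only
--     # accounts/dexes are included only when they contain at least one coin.
--     def merge(b, e, depth):
--         if depth == 0:
--             out = dict(b)
--             for coin, meta in e.items():
--                 if coin not in out:
--                     out[coin] = meta
--             return out
--         out = {}
--         for k, vb in b.items():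
--             out[k] = merge(vb, e.get(k, {}), depth - 1)
--         for k, ve in e.items():
--             if k not in b:
--                 sub = merge({}, ve, depth - 1)
--                 if sub:
--                     out[k] = sub
--         return out
--
--     return merge(base, extra, 2)
-- ===== Notes on version B (the rewrite author's own statement) =====
-- stated objective: alternative
-- what changed: A builds the base copy and then patches it in place with a triple-nested loop of setdefault/membership updates per (acct, dex, coin); B is a recursive depth-limited deep-merge (merge(b, e, depth) with depth=2) that rebuilds each level per key, recursing on base keys and adding extra-only keys only when their sub-merge is non-empty.
import Mathlib
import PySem

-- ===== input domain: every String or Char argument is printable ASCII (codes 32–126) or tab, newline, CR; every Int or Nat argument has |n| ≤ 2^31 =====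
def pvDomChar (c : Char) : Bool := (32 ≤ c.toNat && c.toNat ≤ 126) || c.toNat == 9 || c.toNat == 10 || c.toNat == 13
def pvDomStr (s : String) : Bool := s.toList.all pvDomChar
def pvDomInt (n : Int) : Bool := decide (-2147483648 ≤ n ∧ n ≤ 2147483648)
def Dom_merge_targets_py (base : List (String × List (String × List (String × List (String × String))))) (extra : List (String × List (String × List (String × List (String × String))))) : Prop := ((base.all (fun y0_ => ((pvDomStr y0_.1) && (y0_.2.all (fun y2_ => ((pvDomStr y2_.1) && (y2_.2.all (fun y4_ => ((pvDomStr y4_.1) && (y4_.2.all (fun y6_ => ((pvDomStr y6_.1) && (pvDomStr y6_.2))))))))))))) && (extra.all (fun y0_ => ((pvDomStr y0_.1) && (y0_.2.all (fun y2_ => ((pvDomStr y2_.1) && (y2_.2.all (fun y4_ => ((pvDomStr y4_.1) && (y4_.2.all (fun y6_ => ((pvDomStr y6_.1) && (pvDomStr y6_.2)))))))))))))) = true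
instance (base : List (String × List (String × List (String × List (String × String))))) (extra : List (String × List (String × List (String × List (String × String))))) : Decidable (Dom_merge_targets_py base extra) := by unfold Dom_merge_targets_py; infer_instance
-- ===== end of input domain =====

-- B replaces A's in-place triple-nested update loop by a recursive per-key rebuild
-- (depth-limited deep merge); same cost, different decomposition ("alternative").
-- Dicts are ported as insertion-ordered association lists; the dict operations used
-- below are exact for association lists with no duplicate keys, which Pre_ requires
-- (a duplicate-keyed association list does not represent any Python dict).

-- ===== PORT A =====
-- assoc-list transcriptions of the dict operations A uses (exact under Pre_'s nodup keys)
def aContains {α : Type} (l : List (String × α)) (k : String) : Bool :=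
  l.any (fun p => p.1 == k)

def aGetD {α : Type} (l : List (String × α)) (k : String) (d : α) : α :=
  ((l.find? (fun p => p.1 == k)).map (·.2)).getD d

def aSetdefault {α : Type} (l : List (String × α)) (k : String) (v : α) : List (String × α) :=
  if aContains l k then l else l ++ [(k, v)]

def aModify {α : Type} (l : List (String × α)) (k : String) (f : α → α) : List (String × α) :=
  l.map (fun p => if p.1 == k then (k, f p.2) else p)

def merge_targets_py (base : List (String × List (String × List (String × List (String × String))))) (extra : List (String × List (String × List (String × List (String × String))))) : List (String × List (String × List (String × List (String × String)))) :=
  -- out = {}; for acct, d1 in base: out[acct] = {}; for dex, d2 in d1: out[acct][dex] = dict(d2)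
  let out := base.foldl (fun out p =>
    out ++ [(p.1, p.2.foldl (fun o q => o ++ [(q.1, q.2)]) [])]) []
  -- for acct, d1 in extra: for dex, d2 in d1: for coin, meta in d2: …
  extra.foldl (fun out p =>
    p.2.foldl (fun out q =>
      q.2.foldl (fun out r =>
        -- out.setdefault(acct, {}).setdefault(dex, {})
        let out2 := aModify (aSetdefault out p.1 []) p.1 (fun d => aSetdefault d q.1 [])
        -- if coin not in out[acct][dex]: out[acct][dex][coin] = meta
        if aContains (aGetD (aGetD out2 p.1 []) q.1 []) r.1 then out2
        else aModify out2 p.1 (fun d => aModify d q.1 (fun c => c ++ [(r.1, r.2)])))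
        out) out) out

-- ===== PORT B =====
-- Source B's e.get(k, {})
def altGet {α : Type} (e : List (String × α)) (k : String) (d : α) : α :=
  ((e.find? (fun p => p.1 == k)).map (·.2)).getD d

-- Source B's depth-0 case: out = dict(b); add each coin of e not already present
def altMergeFlat {α : Type} (b e : List (String × α)) : List (String × α) :=
  e.foldl (fun out r => if out.any (fun p => p.1 == r.1) then out else out ++ [r]) b

-- Source B's depth>0 case; the Python recursion on `depth` is monomorphised here
-- (the nested dict types differ per level), `m` being the depth-1 merge
def altMergeNode {α : Type} (m : List (String × α) → List (String × α) → List (String × α))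
    (b e : List (String × List (String × α))) : List (String × List (String × α)) :=
  let out := b.foldl (fun out p => out ++ [(p.1, m p.2 (altGet e p.1 []))]) []
  e.foldl (fun out p =>
    if b.any (fun q => q.1 == p.1) then out
    else
      let sub := m [] p.2
      if sub.isEmpty then out else out ++ [(p.1, sub)]) out

def merge_targets_py_alt (base : List (String × List (String × List (String × List (String × String))))) (extra : List (String × List (String × List (String × List (String × String))))) : List (String × List (String × List (String × List (String × String)))) :=
  altMergeNode (altMergeNode altMergeFlat) base extra

-- ===== PRECONDITION & SPEC =====
-- Pre_ excludes association lists with duplicate keys at any dict level: such a list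
-- does not represent any Python dict (building the dict collapses the duplicates),
-- so neither program's value on it is specified.
def Pre_merge_targets_py (base : List (String × List (String × List (String × List (String × String))))) (extra : List (String × List (String × List (String × List (String × String))))) : Prop :=
  (∀ l ∈ [base, extra],
    (l.map Prod.fst).Nodup ∧
    ∀ p ∈ l, (p.2.map Prod.fst).Nodup ∧
      ∀ q ∈ p.2, (q.2.map Prod.fst).Nodup ∧
        ∀ r ∈ q.2, (r.2.map Prod.fst).Nodup)

instance (base : List (String × List (String × List (String × List (String × String))))) (extra : List (String × List (String × List (String × List (String × String))))) : Decidable (Pre_merge_targets_py base extra) := by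
  unfold Pre_merge_targets_py; infer_instance

def pvWitness_merge_targets_py : (List (String × List (String × List (String × List (String × String))))) × (List (String × List (String × List (String × List (String × String))))) :=
  ([("A", [("dex", [("BTC", [("sz", "1")])])])],
   [("A", [("dex", [("BTC", [("sz", "2")]), ("ETH", [])])]), ("B", [("d2", [])])])

def Spec_merge_targets_py (base : List (String × List (String × List (String × List (String × String))))) (extra : List (String × List (String × List (String × List (String × String))))) (out : List (String × List (String × List (String × List (String × String))))) : Prop := out = merge_targets_py_alt base extra
instance (base : List (String × List (String × List (String × List (String × String))))) (extra : List (String × List (String × List (String × List (String × String))))) (out : List (String × List (String × List (String × List (String × String))))) : Decidable (Spec_merge_targets_py base extra out) := by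
  unfold Spec_merge_targets_py
  letI d1 : DecidableEq (List (String × String)) := inferInstance
  letI d2 : DecidableEq (List (String × List (String × String))) := inferInstance
  letI d3 : DecidableEq (List (String × List (String × List (String × String)))) := inferInstance
  infer_instance

-- ===== CLAIM (what is proved, stated in full; the proofs are below) =====
def Claim_equal_merge_targets_py : Prop := ∀ (base : List (String × List (String × List (String × List (String × String))))) (extra : List (String × List (String × List (String × List (String × String))))), Dom_merge_targets_py base extra → Pre_merge_targets_py base extra → Spec_merge_targets_py base extra (merge_targets_py base extra)

-- ===== LEMMAS AND PROOFS =====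

-- key-nodup predicate for association lists
def pvKN {A : Type} (l : List (String × A)) : Prop := (l.map Prod.fst).Nodup

-- "update at key": modify in place if present, else append (k, f z)
def updAt {A : Type} (z : A) (l : List (String × A)) (k : String) (f : A → A) : List (String × A) :=
  if aContains l k then aModify l k f else l ++ [(k, f z)]

-- the per-coin value-level update A performs at a fixed (dex, coin)
def gA {A : Type} (dex : String) (r : String × A) (a : List (String × List (String × A))) :
    List (String × List (String × A)) :=
  let a1 := aSetdefault a dex []
  if aContains (aGetD a1 dex []) r.1 then a1 else aModify a1 dex (fun c => c ++ [r])

-- ---- basic facts about the assoc-list dict operations ----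

theorem aContains_iff {A : Type} (l : List (String × A)) (k : String) :
    aContains l k = true ↔ ∃ p ∈ l, p.1 = k := by
  simp [aContains]

theorem aContains_false_iff {A : Type} (l : List (String × A)) (k : String) :
    aContains l k = false ↔ ∀ p ∈ l, p.1 ≠ k := by
  simp [aContains]

theorem aContains_append {A : Type} (l l' : List (String × A)) (k : String) :
    aContains (l ++ l') k = (aContains l k || aContains l' k) := by
  simp [aContains]

theorem aContains_mem_keys {A : Type} (l : List (String × A)) (k : String) :
    aContains l k = true ↔ k ∈ l.map Prod.fst := by
  rw [aContains_iff]
  constructor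
  · rintro ⟨p, hp, hpk⟩
    exact List.mem_map.mpr ⟨p, hp, hpk⟩
  · intro h
    rcases List.mem_map.mp h with ⟨p, hp, hpk⟩
    exact ⟨p, hp, hpk⟩

theorem aModify_append {A : Type} (l l' : List (String × A)) (k : String) (f : A → A) :
    aModify (l ++ l') k f = aModify l k f ++ aModify l' k f := by
  simp [aModify]

theorem aModify_of_not_contains {A : Type} {l : List (String × A)} {k : String}
    (h : aContains l k = false) (f : A → A) : aModify l k f = l := by
  rw [aContains_false_iff] at h
  unfold aModify
  conv_rhs => rw [← List.map_id l]
  refine List.map_congr_left ?_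
  intro p hp
  simp [h p hp]

theorem keys_aModify {A : Type} (l : List (String × A)) (k : String) (f : A → A) :
    (aModify l k f).map Prod.fst = l.map Prod.fst := by
  unfold aModify
  rw [List.map_map]
  refine List.map_congr_left ?_
  intro p _
  by_cases h : p.1 = k <;> simp [h]

theorem aContains_aModify {A : Type} (l : List (String × A)) (k k' : String) (f : A → A) :
    aContains (aModify l k f) k' = aContains l k' := by
  by_cases h : aContains l k' = true
  · rw [h, aContains_mem_keys, keys_aModify, ← aContains_mem_keys, h]
  · simp only [Bool.not_eq_true] at h
    rw [h, ← Bool.not_eq_true, aContains_mem_keys, keys_aModify, ← aContains_mem_keys, h]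
    simp

theorem aModify_aModify {A : Type} (l : List (String × A)) (k : String) (f g : A → A) :
    aModify (aModify l k f) k g = aModify l k (fun a => g (f a)) := by
  unfold aModify
  rw [List.map_map]
  refine List.map_congr_left ?_
  intro p _
  by_cases h : p.1 = k <;> simp [h]

theorem aGetD_of_not_contains {A : Type} {l : List (String × A)} {k : String}
    (h : aContains l k = false) (d : A) : aGetD l k d = d := by
  rw [aContains_false_iff] at h
  unfold aGetD
  rw [List.find?_eq_none.mpr]
  · rfl
  · intro p hp
    simp [h p hp]

theorem aGetD_append_left {A : Type} {l : List (String × A)} {k : String}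
    (h : aContains l k = true) (l' : List (String × A)) (d : A) :
    aGetD (l ++ l') k d = aGetD l k d := by
  unfold aGetD
  rw [List.find?_append]
  rcases hf : l.find? (fun p => p.1 == k) with _ | p
  · exfalso
    rw [aContains_iff] at h
    rcases h with ⟨p, hp, hpk⟩
    have := List.find?_eq_none.mp hf p hp
    simp [hpk] at this
  · rw [hf]
    rfl

theorem aGetD_append_not_contains {A : Type} {l : List (String × A)} {k : String}
    (h : aContains l k = false) (l' : List (String × A)) (d : A) :
    aGetD (l ++ l') k d = aGetD l' k d := by
  unfold aGetD
  rw [List.find?_append, List.find?_eq_none.mpr]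
  · rfl
  · rw [aContains_false_iff] at h
    intro p hp
    simp [h p hp]

theorem aGetD_aModify_self {A : Type} (k : String) (f : A → A) (d : A) :
    ∀ l : List (String × A), aContains l k = true →
      aGetD (aModify l k f) k d = f (aGetD l k d) := by
  intro l
  induction l with
  | nil => intro h; simp [aContains] at h
  | cons p l ih =>
    intro h
    by_cases hp : p.1 = k
    · simp [aModify, aGetD, hp]
    · have h' : aContains l k = true := by
        simp only [aContains, List.any_cons, Bool.or_eq_true, beq_iff_eq] at h
        rcases h with h | h
        · exact absurd h hp
        · exact h
      simpa [aModify, aGetD, hp] using ih h'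

theorem aModify_congr {A : Type} (k : String) (d : A) (f g : A → A) :
    ∀ l : List (String × A), pvKN l →
      f (aGetD l k d) = g (aGetD l k d) → aModify l k f = aModify l k g := by
  intro l
  induction l with
  | nil => intro _ _; rfl
  | cons p l ih =>
    intro hnd h
    unfold pvKN at hnd
    simp only [List.map_cons, List.nodup_cons] at hnd
    by_cases hp : p.1 = k
    · have hlk : aContains l k = false := by
        rw [aContains_false_iff]
        intro q hq hqk
        apply hnd.1
        rw [hp, ← hqk]
        exact List.mem_map_of_mem hq
      have hget : aGetD (p :: l) k d = p.2 := by simp [aGetD, hp]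
      rw [hget] at h
      have hpk : (p.1 == k) = true := by simp [hp]
      simp only [aModify, List.map_cons, hpk, if_true, h]
      have t1 := aModify_of_not_contains hlk f
      have t2 := aModify_of_not_contains hlk g
      unfold aModify at t1 t2
      rw [t1, t2]
    · have hget : aGetD (p :: l) k d = aGetD l k d := by simp [aGetD, hp]
      rw [hget] at h
      have hrec := ih hnd.2 h
      have hpk : (p.1 == k) = false := by simp [hp]
      unfold aModify at hrec ⊢
      simp only [List.map_cons, hpk, Bool.false_eq_true, if_false]
      rw [hrec]

theorem aModify_self_id {A : Type} (l : List (String × A)) (k : String) :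
    aModify l k (fun a => a) = l := by
  unfold aModify
  conv_rhs => rw [← List.map_id l]
  refine List.map_congr_left ?_
  intro p _
  by_cases h : p.1 = k
  · simp [h, Prod.ext_iff]
  · simp [h]

-- ---- updAt lemmas ----

theorem keys_updAt {A : Type} (z : A) (l : List (String × A)) (k : String) (f : A → A) :
    (updAt z l k f).map Prod.fst =
      if aContains l k then l.map Prod.fst else l.map Prod.fst ++ [k] := by
  unfold updAt
  by_cases h : aContains l k = true <;> simp [h, keys_aModify]

theorem pvKN_updAt {A : Type} {l : List (String × A)} (z : A) (k : String) (f : A → A)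
    (h : pvKN l) : pvKN (updAt z l k f) := by
  unfold pvKN
  rw [keys_updAt]
  by_cases hc : aContains l k = true
  · rw [if_pos hc]; exact h
  · simp only [Bool.not_eq_true] at hc
    rw [if_neg (by simp [hc])]
    rw [List.nodup_append]
    refine ⟨by exact h, by simp, ?_⟩
    intro a ha b hb
    have hbk : b = k := by simpa using hb
    subst hbk
    intro hak
    rw [hak, ← aContains_mem_keys] at ha
    rw [ha] at hc
    exact absurd hc (by simp)

theorem updAt_comp {A : Type} (z : A) (l : List (String × A)) (k : String) (f g : A → A) :
    updAt z (updAt z l k f) k g = updAt z l k (fun a => g (f a)) := by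
  unfold updAt
  by_cases hc : aContains l k = true
  · simp only [hc, if_true, aContains_aModify, aModify_aModify]
  · simp only [Bool.not_eq_true] at hc
    have h1 : aContains (l ++ [(k, f z)]) k = true := by
      rw [aContains_append]; simp [aContains]
    simp only [hc, Bool.false_eq_true, if_false]
    rw [if_pos h1, aModify_append, aModify_of_not_contains hc]
    simp [aModify]

theorem updAt_congr {A : Type} {l : List (String × A)} {z : A} {k : String} {f g : A → A}
    (hnd : pvKN l) (h : f (aGetD l k z) = g (aGetD l k z)) :
    updAt z l k f = updAt z l k g := by
  unfold updAt
  by_cases hc : aContains l k = true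
  · simp only [hc, if_true]
    exact aModify_congr _ z _ _ _ hnd h
  · simp only [Bool.not_eq_true] at hc
    rw [aGetD_of_not_contains hc] at h
    simp [hc, h]

-- ---- fold-at-one-key composition ----

theorem foldl_updAt {A X : Type} (z : A) (k : String) (g : X → A → A) :
    ∀ (xs : List X) (l : List (String × A)),
      xs.foldl (fun out x => updAt z out k (g x)) l =
        if xs.isEmpty then l else updAt z l k (fun a => xs.foldl (fun a x => g x a) a) := by
  intro xs
  induction xs with
  | nil => intro l; simp
  | cons x xs ih =>
    intro l
    simp only [List.foldl_cons]
    rw [ih (updAt z l k (g x))]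
    by_cases hxs : xs.isEmpty = true
    · have hx : xs = [] := List.isEmpty_iff.mp hxs
      subst hx
      simp
    · rw [if_neg (by simp [hxs]), if_neg (by simp), updAt_comp]

theorem foldl_value_id {A X : Type} (g : String → X → A → A) :
    ∀ (xss : List (String × List X)) (a : A),
      xss.all (fun q => q.2.isEmpty) = true →
      xss.foldl (fun a q => q.2.foldl (fun a x => g q.1 x a) a) a = a := by
  intro xss
  induction xss with
  | nil => intro a _; rfl
  | cons q xss ih =>
    intro a hall
    simp only [List.all_cons, Bool.and_eq_true] at hall
    have hq : q.2 = [] := List.isEmpty_iff.mp hall.1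
    simp only [List.foldl_cons, hq, List.foldl_nil]
    exact ih a hall.2

theorem foldl_updAt_groups {A X : Type} (z : A) (k : String) (g : String → X → A → A) :
    ∀ (xss : List (String × List X)) (l : List (String × A)),
      xss.foldl (fun out q => q.2.foldl (fun out x => updAt z out k (g q.1 x)) out) l =
        if xss.all (fun q => q.2.isEmpty) then l
        else updAt z l k (fun a => xss.foldl (fun a q => q.2.foldl (fun a x => g q.1 x a) a) a) := by
  intro xss
  induction xss with
  | nil => intro l; simp
  | cons q xss ih =>
    intro l
    simp only [List.foldl_cons]
    rw [foldl_updAt z k (g q.1) q.2 l, List.all_cons]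
    by_cases hq : q.2.isEmpty = true
    · have hq0 : q.2 = [] := List.isEmpty_iff.mp hq
      rw [if_pos hq, ih l]
      simp only [hq0, List.foldl_nil, List.isEmpty_nil, Bool.true_and]
    · rw [if_neg (by simp [hq]), ih (updAt z l k fun a => q.2.foldl (fun a x => g q.1 x a) a)]
      by_cases hall : xss.all (fun q => q.2.isEmpty) = true
      · rw [if_pos hall, if_neg (by simp [hq])]
        congr 1
        funext a
        exact (foldl_value_id g xss (q.2.foldl (fun a x => g q.1 x a) a) hall).symm
      · rw [if_neg (by simp [hall]), if_neg (by simp [hq, hall]), updAt_comp]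

-- ---- fold congruence under an invariant ----

theorem foldl_congr_inv {A B : Type} (Inv : A → Prop) (f g : A → B → A) :
    ∀ (xs : List B) (a : A), Inv a →
      (∀ l x, x ∈ xs → Inv l → f l x = g l x) →
      (∀ l x, x ∈ xs → Inv l → Inv (g l x)) →
      xs.foldl f a = xs.foldl g a := by
  intro xs
  induction xs with
  | nil => intro a _ _ _; rfl
  | cons x xs ih =>
    intro a ha hfg hinv
    simp only [List.foldl_cons]
    rw [hfg a x (List.mem_cons_self) ha]
    exact ih (g a x) (hinv a x (List.mem_cons_self) ha)
      (fun l y hy hl => hfg l y (List.mem_cons_of_mem x hy) hl)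
      (fun l y hy hl => hinv l y (List.mem_cons_of_mem x hy) hl)

theorem foldl_inv {A B : Type} (Inv : A → Prop) (g : A → B → A) :
    ∀ (xs : List B) (a : A), Inv a →
      (∀ l x, x ∈ xs → Inv l → Inv (g l x)) → Inv (xs.foldl g a) := by
  intro xs
  induction xs with
  | nil => intro a ha _; exact ha
  | cons x xs ih =>
    intro a ha hinv
    exact ih (g a x) (hinv a x (List.mem_cons_self) ha)
      (fun l y hy hl => hinv l y (List.mem_cons_of_mem x hy) hl)

-- ---- A's atomic coin step is an updAt at the account key ----

theorem atomic_eq {A : Type} (out : List (String × List (String × List (String × A))))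
    (k dex : String) (r : String × A) (hnd : pvKN out) :
    (let out2 := aModify (aSetdefault out k []) k (fun d => aSetdefault d dex [])
     if aContains (aGetD (aGetD out2 k []) dex []) r.1 then out2
     else aModify out2 k (fun d => aModify d dex (fun c => c ++ [r]))) =
    updAt [] out k (gA dex r) := by
  dsimp only
  by_cases hc : aContains out k = true
  · have hsd : aSetdefault out k [] = out := by simp [aSetdefault, hc]
    rw [hsd]
    rw [aGetD_aModify_self k (fun d => aSetdefault d dex []) [] out hc]
    unfold updAt
    rw [if_pos hc]
    by_cases ht :
        aContains (aGetD (aSetdefault (aGetD out k []) dex []) dex []) r.1 = true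
    · rw [if_pos ht]
      refine aModify_congr k [] _ _ out hnd ?_
      show aSetdefault (aGetD out k []) dex [] = gA dex r (aGetD out k [])
      unfold gA
      dsimp only
      rw [if_pos ht]
    · rw [if_neg ht, aModify_aModify]
      refine aModify_congr k [] _ _ out hnd ?_
      show aModify (aSetdefault (aGetD out k []) dex []) dex (fun c => c ++ [r]) =
        gA dex r (aGetD out k [])
      unfold gA
      dsimp only
      rw [if_neg ht]
  · have hc2 : aContains out k = false := by simpa using hc
    have hsd : aSetdefault out k [] = out ++ [(k, [])] := by simp [aSetdefault, hc2]
    rw [hsd, aModify_append, aModify_of_not_contains hc2]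
    have hone : aModify [(k, ([] : List (String × List (String × A))))] k
        (fun d => aSetdefault d dex []) = [(k, aSetdefault [] dex [])] := by
      simp [aModify]
    rw [hone]
    have hget : aGetD (out ++ [(k, aSetdefault [] dex [])]) k [] = aSetdefault [] dex [] := by
      rw [aGetD_append_not_contains hc2]
      simp [aGetD]
    rw [hget]
    have hupd : updAt [] out k (gA dex r) = out ++ [(k, gA dex r [])] := by
      unfold updAt
      rw [if_neg (by simp [hc2])]
    rw [hupd]
    unfold gA
    dsimp only
    by_cases ht :
        aContains (aGetD (aSetdefault ([] : List (String × List (String × A))) dex []) dex [])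
          r.1 = true
    · rw [if_pos ht, if_pos ht]
    · rw [if_neg ht, if_neg ht, aModify_append, aModify_of_not_contains hc2]
      simp [aModify]

theorem gA_eq {A : Type} (dex : String) (r : String × A)
    (a : List (String × List (String × A))) (hnd : pvKN a) :
    gA dex r a = updAt [] a dex (fun c => if aContains c r.1 then c else c ++ [r]) := by
  unfold gA updAt
  dsimp only
  by_cases hc : aContains a dex = true
  · have hsd : aSetdefault a dex [] = a := by simp [aSetdefault, hc]
    rw [hsd, if_pos hc]
    by_cases ht : aContains (aGetD a dex []) r.1 = true
    · rw [if_pos ht]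
      have hmod := aModify_congr dex [] (fun c => if aContains c r.1 then c else c ++ [r])
        (fun c => c) a hnd (by dsimp only; rw [if_pos ht])
      rw [hmod, aModify_self_id]
    · rw [if_neg ht]
      exact aModify_congr dex [] _ _ a hnd (by rw [if_neg ht])
  · have hc2 : aContains a dex = false := by simpa using hc
    have hsd : aSetdefault a dex [] = a ++ [(dex, [])] := by simp [aSetdefault, hc2]
    rw [hsd]
    have hget : aGetD (a ++ [(dex, ([] : List (String × A)))]) dex [] = [] := by
      rw [aGetD_append_not_contains hc2]
      simp [aGetD]
    rw [hget]
    rw [if_neg (show ¬aContains ([] : List (String × A)) r.1 = true by simp [aContains])]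
    rw [if_neg (show ¬aContains a dex = true by simp [hc2])]
    rw [aModify_append, aModify_of_not_contains hc2]
    simp [aModify, aContains]

-- ---- shape of B's altMergeFlat / altMergeNode ----

theorem flat_nil {A : Type} (b : List (String × A)) : altMergeFlat b [] = b := rfl

theorem flat_exists_append {A : Type} :
    ∀ (e b : List (String × A)), ∃ t, altMergeFlat b e = b ++ t := by
  intro e
  induction e with
  | nil => intro b; exact ⟨[], by simp [altMergeFlat]⟩
  | cons r e ih =>
    intro b
    simp only [altMergeFlat, List.foldl_cons]
    by_cases h : b.any (fun p => p.1 == r.1) = true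
    · simp only [h, if_true]
      exact ih b
    · simp only [Bool.not_eq_true] at h
      simp only [h, Bool.false_eq_true, if_false]
      rcases ih (b ++ [r]) with ⟨t, ht⟩
      exact ⟨[r] ++ t, by rw [← List.append_assoc]; exact ht⟩

theorem flat_isEmpty {A : Type} (e : List (String × A)) :
    (altMergeFlat [] e).isEmpty = e.isEmpty := by
  cases e with
  | nil => rfl
  | cons r e =>
    simp only [altMergeFlat, List.foldl_cons, List.any_nil, Bool.false_eq_true, if_false,
      List.nil_append]
    rcases flat_exists_append e [r] with ⟨t, ht⟩
    unfold altMergeFlat at ht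
    rw [ht]
    simp

-- closed form of altMergeNode: base part (a map) ++ extra-only part (a filtered map)
theorem node_eq {A : Type}
    (m : List (String × A) → List (String × A) → List (String × A))
    (b e : List (String × List (String × A))) :
    altMergeNode m b e =
      b.map (fun p => (p.1, m p.2 (altGet e p.1 []))) ++
      (e.filter (fun p => !(b.any (fun q => q.1 == p.1)) && !(m [] p.2).isEmpty)).map
        (fun p => (p.1, m [] p.2)) := by
  unfold altMergeNode
  rw [PySem.List.foldl_append_singleton_eq_map]
  have hstep :
      (fun (out : List (String × List (String × A))) (p : String × List (String × A)) =>
        if b.any (fun q => q.1 == p.1) then out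
        else
          let sub := m [] p.2
          if sub.isEmpty then out else out ++ [(p.1, sub)]) =
      (fun out p =>
        if (!(b.any (fun q => q.1 == p.1)) && !(m [] p.2).isEmpty) then out ++ [(p.1, m [] p.2)]
        else out) := by
    funext out p
    by_cases h1 : b.any (fun q => q.1 == p.1) = true
    · simp [h1]
    · by_cases h2 : (m [] p.2).isEmpty = true <;> simp [h1, h2]
  rw [hstep, PySem.List.foldl_append_if]
  simp

theorem altGet_eq_aGetD {A : Type} (e : List (String × A)) (k : String) (d : A) :
    altGet e k d = aGetD e k d := rfl

theorem altGet_all_eq {A : Type} (v0 : A) (k : String) :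
    ∀ e : List (String × A), (∀ q ∈ e, q.2 = v0) → altGet e k v0 = v0 := by
  intro e h
  unfold altGet
  rcases hf : e.find? (fun p => p.1 == k) with _ | p
  · rw [hf]
    rfl
  · have hp := List.mem_of_find?_eq_some hf
    rw [hf]
    simp [h p hp]

theorem node_id {A : Type} (m : List (String × A) → List (String × A) → List (String × A))
    (b : List (String × List (String × A))) (hm : ∀ p ∈ b, m p.2 [] = p.2) :
    altMergeNode m b [] = b := by
  rw [node_eq]
  simp only [List.filter_nil, List.map_nil, List.append_nil]
  conv_rhs => rw [← List.map_id b]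
  refine List.map_congr_left ?_
  intro p hp
  simp [altGet, hm p hp]

theorem node_skip {A : Type} (a e : List (String × List (String × A)))
    (hAll : ∀ q ∈ e, q.2 = []) : altMergeNode altMergeFlat a e = a := by
  rw [node_eq]
  have hfil : (e.filter
      (fun p => !(a.any (fun q => q.1 == p.1)) && !(altMergeFlat [] p.2).isEmpty)) = [] := by
    rw [List.filter_eq_nil_iff]
    intro q hq
    rw [hAll q hq]
    simp [show (altMergeFlat ([] : List (String × A)) []).isEmpty = true from rfl]
  rw [hfil]
  simp only [List.map_nil, List.append_nil]
  conv_rhs => rw [← List.map_id a]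
  refine List.map_congr_left ?_
  intro p hp
  rw [altGet_all_eq [] p.1 e hAll]
  rfl

theorem node_isEmpty {A : Type} (e : List (String × List (String × A))) :
    (altMergeNode altMergeFlat [] e).isEmpty = e.all (fun q => q.2.isEmpty) := by
  rw [node_eq]
  simp only [List.map_nil, List.nil_append, List.any_nil, Bool.not_false, Bool.true_and]
  by_cases h : e.all (fun q => q.2.isEmpty) = true
  · rw [h, List.isEmpty_iff, List.map_eq_nil_iff, List.filter_eq_nil_iff]
    intro q hq
    have hq2 : q.2.isEmpty = true := by
      have := List.all_eq_true.mp h q hq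
      simpa using this
    simp [flat_isEmpty, hq2]
  · have h2 : e.all (fun q => q.2.isEmpty) = false := by simpa using h
    rw [h2]
    rcases List.all_eq_false.mp h2 with ⟨q, hq, hq2⟩
    have hq3 : q.2.isEmpty = false := by simpa using hq2
    have hmem : q ∈ e.filter (fun p => !(altMergeFlat [] p.2).isEmpty) := by
      rw [List.mem_filter]
      exact ⟨hq, by rw [flat_isEmpty, hq3]; rfl⟩
    rw [Bool.eq_false_iff]
    intro habs
    rw [List.isEmpty_iff, List.map_eq_nil_iff] at habs
    rw [habs] at hmem
    exact absurd hmem (List.not_mem_nil)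

theorem keys_node {A : Type}
    (m : List (String × A) → List (String × A) → List (String × A))
    (b e : List (String × List (String × A))) :
    (altMergeNode m b e).map Prod.fst =
      b.map Prod.fst ++
        ((e.filter (fun p => !(b.any (fun q => q.1 == p.1)) && !(m [] p.2).isEmpty)).map
          Prod.fst) := by
  rw [node_eq, List.map_append, List.map_map, List.map_map]
  rfl

theorem pvKN_node {A : Type}
    (m : List (String × A) → List (String × A) → List (String × A))
    {b e : List (String × List (String × A))} (hb : pvKN b) (he : pvKN e) :
    pvKN (altMergeNode m b e) := by
  unfold pvKN
  rw [keys_node, List.nodup_append]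
  refine ⟨by exact hb, ?_, ?_⟩
  · exact List.Nodup.sublist (List.Sublist.map Prod.fst List.filter_sublist) he
  · intro x hx y hy
    rcases List.mem_map.mp hy with ⟨q, hq, hqy⟩
    rw [List.mem_filter] at hq
    have hnb : (b.any (fun r => r.1 == q.1)) = false := by
      rcases (Bool.and_eq_true _ _).mp hq.2 with ⟨h1, _⟩
      simpa using h1
    have hnb2 : aContains b q.1 = false := hnb
    rw [aContains_false_iff] at hnb2
    intro hxy
    rcases List.mem_map.mp hx with ⟨p, hp, hpx⟩
    exact hnb2 p hp (by rw [hpx, hxy, hqy])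

theorem pvKN_append_singleton {A : Type} {e : List (String × A)} {p : String × A}
    (h : pvKN (e ++ [p])) : pvKN e ∧ aContains e p.1 = false := by
  unfold pvKN at h
  rw [List.map_append, List.nodup_append] at h
  refine ⟨h.1, ?_⟩
  rw [aContains_false_iff]
  intro q hq hqk
  exact h.2.2 q.1 (List.mem_map_of_mem hq) p.1 (by simp) hqk

-- ---- the generic one-level equivalence ----

theorem genLevel {A : Type}
    (m Asub : List (String × A) → List (String × A) → List (String × A))
    (g : List (String × A) → Bool) (Q : List (String × A) → Prop)
    (hQnil : Q [])
    (H1 : ∀ a, Q a → m a [] = a)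
    (H2 : ∀ e, Q e → (m [] e).isEmpty = g e)
    (H3 : ∀ a e, Q a → Q e → Asub a e = m a e)
    (H5 : ∀ a e, Q a → Q e → g e = true → m a e = a) :
    ∀ (e b : List (String × List (String × A))),
      pvKN b → (∀ p ∈ b, Q p.2) → pvKN e → (∀ p ∈ e, Q p.2) →
      e.foldl (fun out p =>
        if g p.2 then out else updAt [] out p.1 (fun a => Asub a p.2)) b =
      altMergeNode m b e := by
  intro e
  induction e using List.reverseRecOn with
  | nil =>
    intro b hb hbQ _ _
    simp only [List.foldl_nil]
    exact (node_id m b (fun p hp => H1 p.2 (hbQ p hp))).symm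
  | append_singleton e p ih =>
    intro b hb hbQ hKNe hQe
    obtain ⟨hKNe2, hpe⟩ := pvKN_append_singleton hKNe
    have hQe2 : ∀ q ∈ e, Q q.2 := fun q hq => hQe q (List.mem_append_left _ hq)
    have hQp : Q p.2 := hQe p (by simp)
    rw [List.foldl_append, ih b hb hbQ hKNe2 hQe2]
    simp only [List.foldl_cons, List.foldl_nil]
    -- the altGet of the base loop is unchanged by appending p unless the key is p.1
    have hgetne : ∀ pb ∈ b, pb.1 ≠ p.1 → altGet (e ++ [p]) pb.1 [] = altGet e pb.1 [] := by
      intro pb _ hne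
      rw [altGet_eq_aGetD, altGet_eq_aGetD]
      by_cases hce : aContains e pb.1 = true
      · rw [aGetD_append_left hce]
      · have hce2 : aContains e pb.1 = false := by simpa using hce
        rw [aGetD_append_not_contains hce2, aGetD_of_not_contains hce2]
        simp [aGetD, Ne.symm hne]
    have hgeteq : altGet (e ++ [p]) p.1 [] = p.2 := by
      rw [altGet_eq_aGetD, aGetD_append_not_contains hpe]
      simp [aGetD]
    by_cases hg : g p.2 = true
    · rw [if_pos hg]
      rw [node_eq m b e, node_eq m b (e ++ [p])]
      congr 1
      · refine List.map_congr_left ?_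
        intro pb hpb
        by_cases hne : pb.1 = p.1
        · have h1 : altGet (e ++ [p]) pb.1 [] = p.2 := by rw [hne]; exact hgeteq
          have h2 : altGet e pb.1 [] = [] := by
            rw [altGet_eq_aGetD, aGetD_of_not_contains (by rw [hne]; exact hpe)]
          rw [h1, h2, H1 pb.2 (hbQ pb hpb), H5 pb.2 p.2 (hbQ pb hpb) hQp hg]
        · rw [hgetne pb hpb hne]
      · rw [List.filter_append]
        have hfp : ([p].filter
            (fun q => !(b.any (fun r => r.1 == q.1)) && !(m [] q.2).isEmpty)) = [] := by
          rw [List.filter_eq_nil_iff]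
          intro q hq
          rw [List.mem_singleton] at hq
          subst hq
          simp [H2 q.2 hQp, hg]
        rw [hfp, List.append_nil]
    · rw [if_neg hg]
      have hgb : g p.2 = false := by simpa using hg
      have hCp : (!(b.any (fun r => r.1 == p.1)) && !(m [] p.2).isEmpty) =
          !(b.any (fun r => r.1 == p.1)) := by
        rw [H2 p.2 hQp, hgb]
        simp
      by_cases hcb : aContains b p.1 = true
      · -- p.1 is a base key: the update modifies the base part in place
        have hcontains : aContains (altMergeNode m b e) p.1 = true := by
          rw [aContains_mem_keys, keys_node]
          refine List.mem_append_left _ ?_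
          rw [← aContains_mem_keys]
          exact hcb
        unfold updAt
        rw [if_pos hcontains, node_eq m b e, node_eq m b (e ++ [p]), aModify_append]
        have hmod2 : aModify ((e.filter
            (fun q => !(b.any (fun r => r.1 == q.1)) && !(m [] q.2).isEmpty)).map
              (fun q => (q.1, m [] q.2))) p.1 (fun a => Asub a p.2) =
            (e.filter (fun q => !(b.any (fun r => r.1 == q.1)) && !(m [] q.2).isEmpty)).map
              (fun q => (q.1, m [] q.2)) := by
          refine aModify_of_not_contains ?_ _
          rw [aContains_false_iff]
          intro q hq habs
          rcases List.mem_map.mp hq with ⟨q0, hq0, hq0e⟩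
          rw [List.mem_filter] at hq0
          rcases (Bool.and_eq_true _ _).mp hq0.2 with ⟨h1, _⟩
          have hb0 : aContains b q0.1 = false := by
            cases hx : (b.any fun r => r.1 == q0.1) with
            | false => exact hx
            | true => rw [hx] at h1; exact absurd h1 (by simp)
          have hq01 : q0.1 = p.1 := by
            rw [← hq0e] at habs
            simpa using habs
          rw [hq01] at hb0
          rw [hb0] at hcb
          exact absurd hcb (by simp)
        rw [hmod2]
        congr 1
        · unfold aModify
          rw [List.map_map]
          refine List.map_congr_left ?_
          intro pb hpb
          by_cases hne : pb.1 = p.1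
          · have hbeq : ((pb.1, m pb.2 (altGet e pb.1 [])).1 == p.1) = true := by simp [hne]
            simp only [Function.comp, hbeq]
            rw [if_pos trivial]
            have h2 : altGet e pb.1 [] = [] := by
              rw [altGet_eq_aGetD, aGetD_of_not_contains (by rw [hne]; exact hpe)]
            have h1 : altGet (e ++ [p]) pb.1 [] = p.2 := by rw [hne]; exact hgeteq
            rw [h1, h2, H1 pb.2 (hbQ pb hpb), H3 pb.2 p.2 (hbQ pb hpb) hQp, hne]
          · have hbeq : ((pb.1, m pb.2 (altGet e pb.1 [])).1 == p.1) = false := by simp [hne]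
            simp only [Function.comp, hbeq]
            rw [if_neg (by simp)]
            rw [hgetne pb hpb hne]
        · rw [List.filter_append]
          have hfp : ([p].filter
              (fun q => !(b.any (fun r => r.1 == q.1)) && !(m [] q.2).isEmpty)) = [] := by
            rw [List.filter_eq_nil_iff]
            intro q hq
            rw [List.mem_singleton] at hq
            subst hq
            simp [show (b.any fun r => r.1 == q.1) = true from hcb]
          rw [hfp, List.append_nil]
      · -- p.1 is a fresh key with coins: the update appends a new entry at the end
        have hcb2 : aContains b p.1 = false := by simpa using hcb
        have hcontains : aContains (altMergeNode m b e) p.1 = false := by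
          rw [← Bool.not_eq_true, aContains_mem_keys, keys_node]
          intro habs
          rcases List.mem_append.mp habs with h | h
          · rw [← aContains_mem_keys] at h
            rw [h] at hcb2
            exact absurd hcb2 (by simp)
          · rcases List.mem_map.mp h with ⟨q, hq, hqe⟩
            rw [List.mem_filter] at hq
            rw [aContains_false_iff] at hpe
            exact hpe q hq.1 hqe
        unfold updAt
        rw [if_neg (by simp [hcontains]), node_eq m b e, node_eq m b (e ++ [p])]
        have h3 : ((fun a => Asub a p.2) ([] : List (String × A))) = m [] p.2 :=
          H3 [] p.2 hQnil hQp
        rw [h3, List.append_assoc]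
        congr 1
        · refine List.map_congr_left ?_
          intro pb hpb
          have hne : pb.1 ≠ p.1 := by
            intro habs
            rw [aContains_false_iff] at hcb2
            exact hcb2 pb hpb habs
          rw [hgetne pb hpb hne]
        · rw [List.filter_append]
          have hfp : (List.filter
              (fun q => !(b.any (fun r => r.1 == q.1)) && !(m [] q.2).isEmpty) [p]) = [p] := by
            simp only [List.filter_cons, List.filter_nil]
            rw [hCp, show (b.any fun r => r.1 == p.1) = false from hcb2]
            simp
          rw [hfp, List.map_append]
          rfl

-- the dex level of the equivalence: A's per-account update equals B's depth-1 merge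
theorem dexLevel {A : Type} :
    ∀ (e a : List (String × List (String × A))), pvKN a → pvKN e →
      e.foldl (fun out q =>
        if q.2.isEmpty then out else updAt [] out q.1 (fun c => altMergeFlat c q.2)) a =
      altMergeNode altMergeFlat a e := by
  intro e a ha he
  exact genLevel altMergeFlat altMergeFlat (fun v => v.isEmpty) (fun _ => True) trivial
    (fun a _ => rfl) (fun e _ => flat_isEmpty e) (fun _ _ _ _ => rfl)
    (fun a e _ _ hge => by rw [List.isEmpty_iff.mp hge]; exact flat_nil a)
    e a ha (fun _ _ => trivial) he (fun _ _ => trivial)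

def Inv3 {A : Type} (out : List (String × List (String × List (String × A)))) : Prop :=
  pvKN out ∧ ∀ pp ∈ out, pvKN pp.2

theorem pvKN_nil {A : Type} : pvKN ([] : List (String × A)) := List.nodup_nil

theorem P_aGetD {B : Type} (P : B → Prop) (l : List (String × B)) (k : String) (d : B)
    (h : ∀ p ∈ l, P p.2) (hd : P d) : P (aGetD l k d) := by
  unfold aGetD
  rcases hf : l.find? (fun p => p.1 == k) with _ | p
  · rw [hf]
    exact hd
  · rw [hf]
    simpa using h p (List.mem_of_find?_eq_some hf)

theorem values_updAt {A : Type} (P : A → Prop) (z : A) (l : List (String × A)) (k : String)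
    (f : A → A) (hl : ∀ q ∈ l, P q.2) (hf : ∀ v, P v → P (f v)) (hz : P (f z)) :
    ∀ q ∈ updAt z l k f, P q.2 := by
  intro q hq
  unfold updAt at hq
  by_cases hc : aContains l k = true
  · rw [if_pos hc] at hq
    unfold aModify at hq
    rcases List.mem_map.mp hq with ⟨q0, hq0, hq0e⟩
    by_cases hqk : (q0.1 == k) = true
    · rw [if_pos hqk] at hq0e
      rw [← hq0e]
      exact hf q0.2 (hl q0 hq0)
    · rw [if_neg hqk] at hq0e
      rw [← hq0e]
      exact hl q0 hq0
  · rw [if_neg hc] at hq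
    rcases List.mem_append.mp hq with h | h
    · exact hl q h
    · have : q = (k, f z) := by simpa using h
      rw [this]
      exact hz

-- A's whole per-account triple of nested loops, in clean updAt form
theorem rawStep_eq {A : Type} (p : String × List (String × List (String × A))) :
    ∀ out, Inv3 out →
      (p.2.foldl (fun out q => q.2.foldl (fun out r =>
        let out2 := aModify (aSetdefault out p.1 []) p.1 (fun d => aSetdefault d q.1 [])
        if aContains (aGetD (aGetD out2 p.1 []) q.1 []) r.1 then out2
        else aModify out2 p.1 (fun d => aModify d q.1 (fun c => c ++ [(r.1, r.2)]))) out) out)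
      = if p.2.all (fun q => q.2.isEmpty) then out
        else updAt [] out p.1 (fun a => p.2.foldl (fun a q =>
          if q.2.isEmpty then a
          else updAt [] a q.1 (fun c => altMergeFlat c q.2)) a) := by
  intro out hout
  have hstep1 : (p.2.foldl (fun out q => q.2.foldl (fun out r =>
        let out2 := aModify (aSetdefault out p.1 []) p.1 (fun d => aSetdefault d q.1 [])
        if aContains (aGetD (aGetD out2 p.1 []) q.1 []) r.1 then out2
        else aModify out2 p.1 (fun d => aModify d q.1 (fun c => c ++ [(r.1, r.2)]))) out) out)
      = p.2.foldl (fun out q =>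
          q.2.foldl (fun out r => updAt [] out p.1 (gA q.1 r)) out) out := by
    refine foldl_congr_inv pvKN _ _ p.2 out hout.1 ?_ ?_
    · intro l q _ hl
      refine foldl_congr_inv pvKN _ _ q.2 l hl ?_ ?_
      · intro l2 r _ hl2
        exact atomic_eq l2 p.1 q.1 r hl2
      · intro l2 r _ hl2
        exact pvKN_updAt _ _ _ hl2
    · intro l q _ hl
      exact foldl_inv pvKN _ q.2 l hl (fun l2 r _ hl2 => pvKN_updAt _ _ _ hl2)
  rw [hstep1, foldl_updAt_groups [] p.1 (fun dex r a => gA dex r a) p.2 out]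
  by_cases hall : p.2.all (fun q => q.2.isEmpty) = true
  · rw [if_pos hall, if_pos hall]
  · rw [if_neg hall, if_neg hall]
    have hv : pvKN (aGetD out p.1 ([] : List (String × List (String × A)))) :=
      P_aGetD pvKN out p.1 [] hout.2 pvKN_nil
    have hinner : ∀ (l : List (String × List (String × A)))
        (q : String × List (String × A)), pvKN l →
        q.2.foldl (fun a r => gA q.1 r a) l =
          if q.2.isEmpty then l else updAt [] l q.1 (fun c => altMergeFlat c q.2) := by
      intro l q hl
      have h1 : q.2.foldl (fun a r => gA q.1 r a) l =
          q.2.foldl (fun a r =>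
            updAt [] a q.1 (fun c => if aContains c r.1 then c else c ++ [r])) l := by
        refine foldl_congr_inv pvKN _ _ q.2 l hl ?_ ?_
        · intro l2 r _ hl2
          exact gA_eq q.1 r l2 hl2
        · intro l2 r _ hl2
          exact pvKN_updAt _ _ _ hl2
      rw [h1, foldl_updAt [] q.1 (fun r c => if aContains c r.1 then c else c ++ [r]) q.2 l]
      rfl
    refine updAt_congr hout.1 ?_
    refine foldl_congr_inv pvKN _ _ p.2 (aGetD out p.1 []) hv ?_ ?_
    · intro l q _ hl
      exact hinner l q hl
    · intro l q _ hl
      by_cases hq : q.2.isEmpty = true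
      · rw [if_pos hq]
        exact hl
      · rw [if_neg hq]
        exact pvKN_updAt _ _ _ hl

theorem cleanStep_inv {A : Type} {l : List (String × List (String × List (String × A)))}
    {x : String × List (String × List (String × A))} (hl : Inv3 l) (hx : pvKN x.2) :
    Inv3 (if x.2.all (fun q => q.2.isEmpty) then l
      else updAt [] l x.1 (fun a => x.2.foldl (fun a q =>
        if q.2.isEmpty then a else updAt [] a q.1 (fun c => altMergeFlat c q.2)) a)) := by
  by_cases hall : x.2.all (fun q => q.2.isEmpty) = true
  · rw [if_pos hall]
    exact hl
  · rw [if_neg hall]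
    have hf : ∀ v, pvKN v → pvKN (x.2.foldl (fun a q =>
        if q.2.isEmpty then a else updAt [] a q.1 (fun c => altMergeFlat c q.2)) v) := by
      intro v hv
      rw [dexLevel x.2 v hv hx]
      exact pvKN_node altMergeFlat hv hx
    exact ⟨pvKN_updAt _ _ _ hl.1,
      values_updAt pvKN [] l x.1 _ hl.2 hf (hf [] pvKN_nil)⟩

-- phase 1 of A copies base verbatim
theorem A_copy {A : Type} (base : List (String × List (String × List (String × A)))) :
    (base.foldl (fun out p =>
      out ++ [(p.1, p.2.foldl (fun o q => o ++ [(q.1, q.2)]) [])]) []) = base := by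
  rw [PySem.List.foldl_append_singleton_eq_map]
  simp only [List.nil_append]
  conv_rhs => rw [← List.map_id base]
  refine List.map_congr_left ?_
  intro p _
  rw [PySem.List.foldl_append_singleton_eq_map]
  simp

-- ===== VERDICT (by name: the statement is the Claim_ definition above) =====
theorem merge_targets_py_spec : Claim_equal_merge_targets_py := by
  intro base extra _ hpre
  unfold Spec_merge_targets_py
  unfold Pre_merge_targets_py at hpre
  have hbase := hpre base (by simp)
  have hextra := hpre extra (by simp)
  have hKNb : pvKN base := hbase.1
  have hVb : ∀ p ∈ base, pvKN p.2 := fun p hp => (hbase.2 p hp).1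
  have hKNe : pvKN extra := hextra.1
  have hVe : ∀ p ∈ extra, pvKN p.2 := fun p hp => (hextra.2 p hp).1
  unfold merge_targets_py merge_targets_py_alt
  dsimp only
  rw [A_copy]
  refine (foldl_congr_inv Inv3 _
    (fun out p => if p.2.all (fun q => q.2.isEmpty) then out
      else updAt [] out p.1 (fun a => p.2.foldl (fun a q =>
        if q.2.isEmpty then a else updAt [] a q.1 (fun c => altMergeFlat c q.2)) a))
    extra base ⟨hKNb, hVb⟩ ?_ ?_).trans ?_
  · intro l x hx hl
    exact rawStep_eq x l hl
  · intro l x hx hl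
    exact cleanStep_inv hl (hVe x hx)
  · exact genLevel (altMergeNode altMergeFlat) _ (fun v => v.all (fun q => q.2.isEmpty)) pvKN
      pvKN_nil
      (fun a _ => node_id altMergeFlat a (fun p _ => rfl))
      (fun e _ => node_isEmpty e)
      (fun a e ha he => dexLevel e a ha he)
      (fun a e _ _ hge => node_skip a e (fun q hq => by
        have := List.all_eq_true.mp hge q hq
        exact List.isEmpty_iff.mp (by simpa using this)))
      extra base hKNb hVb hKNe hVe
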